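-- pv_equiv track=rewrite | github.com/VaninaBlas/Guias | Practicas td1/clase_recursion.py | resto
-- ===== SOURCE A (Python) =====
-- def resto(n:int)->int:
--     '''
--     Requiere: n>=0.
--     Devuelve: el resto de dividir a n por 3.
--     '''
--     if(n==0):
--         return 0
--     else:
--         if(n==1):
--             return 1
--         elif(n==2):
--             return 2
--         else:
--             return resto(n-3)
-- ===== SOURCE B (Python) =====
-- def resto(n: int) -> int:
--     return n % 3
-- ===== Notes on version B (the rewrite author's own statement) =====
-- stated objective: faster
-- what changed: Replaces the repeated-subtraction recursion by the closed form n % 3 (single modulo operation).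
import Mathlib
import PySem

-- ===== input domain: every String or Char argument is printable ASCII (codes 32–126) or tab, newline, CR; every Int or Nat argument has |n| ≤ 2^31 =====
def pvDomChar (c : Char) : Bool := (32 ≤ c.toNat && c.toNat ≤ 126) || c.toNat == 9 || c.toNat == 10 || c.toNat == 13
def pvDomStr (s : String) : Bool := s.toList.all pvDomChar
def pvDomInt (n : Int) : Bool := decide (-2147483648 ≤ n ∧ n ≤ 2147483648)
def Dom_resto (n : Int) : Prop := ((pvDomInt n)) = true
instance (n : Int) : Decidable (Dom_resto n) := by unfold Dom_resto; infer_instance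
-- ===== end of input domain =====

-- B replaces A's repeated-subtraction recursion by the closed form n % 3; for n < 0
-- A recurses forever (RecursionError) while B returns n % 3, hence Pre_.

-- ===== PORT A =====
-- Literal transliteration; the 'n < 0' guard only makes the recursion total where
-- the Python diverges (outside Pre_resto), the value there is junk.
def resto (n : Int) : Int :=
  if n = 0 then 0
  else if n = 1 then 1
  else if n = 2 then 2
  else if n < 0 then 0
  else resto (n - 3)
termination_by n.toNat
decreasing_by omega

-- ===== PORT B =====
def resto_alt (n : Int) : Int := PySem.Int.mod n 3

-- ===== PRECONDITION & SPEC =====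
-- Pre_ excludes n < 0, on which the Python A recurses forever (RecursionError).
def Pre_resto (n : Int) : Prop := 0 ≤ n
instance (n : Int) : Decidable (Pre_resto n) := by unfold Pre_resto; infer_instance
def pvWitness_resto : Int := 7

def Spec_resto (n : Int) (out : Int) : Prop := out = resto_alt n
instance (n : Int) (out : Int) : Decidable (Spec_resto n out) := by unfold Spec_resto; infer_instance

-- ===== CLAIM =====
def Claim_equal_resto : Prop := ∀ (n : Int), Dom_resto n → Pre_resto n → Spec_resto n (resto n)

-- ===== LEMMAS AND PROOFS =====
theorem resto_eq_mod (n : Int) (h : 0 ≤ n) : resto n = PySem.Int.mod n 3 := by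
  obtain ⟨k, rfl⟩ : ∃ k : Nat, n = (k : Int) := ⟨n.toNat, by omega⟩
  clear h
  induction k using Nat.strong_induction_on with
  | _ k ih =>
    rw [resto]
    set n : Int := (k : Int) with hn
    split_ifs with h0 h1 h2 hneg
    · simp [h0, PySem.Int.mod]
    · simp [h1, PySem.Int.mod]
    · simp [h2, PySem.Int.mod]
    · omega
    · have h3 : (3:Int) ≤ n := by omega
      have hk3 : 3 ≤ k := by omega
      have hsub : n - 3 = ((k - 3 : Nat) : Int) := by omega
      rw [hsub, ih (k - 3) (by omega)]
      rw [← hsub]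
      have : PySem.Int.mod (n - 3) 3 = PySem.Int.mod n 3 := by
        rw [PySem.Int.mod_eq_emod_of_pos (by norm_num),
            PySem.Int.mod_eq_emod_of_pos (by norm_num)]
        omega
      exact this

-- ===== VERDICT =====
theorem resto_spec : Claim_equal_resto := by
  intro n _ hpre
  unfold Spec_resto resto_alt
  exact resto_eq_mod n hpre
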